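-- pv_equiv track=rewrite | github.com/iamritikpal/recruiter-finder | utils/recruiter_utils.py | _check_skill_matches
-- ===== SOURCE A (Python) =====
-- def _check_skill_matches(skills, recruiter_text):
--     """Check for skill matches between candidate and recruiter focus"""
--     skill_keywords = {
--         'python': ['python', 'django', 'flask'],
--         'javascript': ['javascript', 'js', 'node', 'react', 'angular', 'vue'],
--         'java': ['java', 'spring', 'kotlin'],
--         'aws': ['aws', 'amazon web services', 'cloud'],
--         'react': ['react', 'frontend'],
--         'machine learning': ['ml', 'machine learning', 'ai', 'artificial intelligence'],
--         'data science': ['data', 'analytics', 'science'],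
--         'devops': ['devops', 'infrastructure', 'deployment'],
--         'mobile': ['mobile', 'ios', 'android', 'react native', 'flutter'],
--         'backend': ['backend', 'server', 'api'],
--         'frontend': ['frontend', 'ui', 'ux']
--     }
--
--     matches = []
--     for skill in skills:
--         skill_lower = skill.lower()
--         for category, keywords in skill_keywords.items():
--             if any(keyword in skill_lower for keyword in keywords):
--                 if any(keyword in recruiter_text for keyword in keywords):
--                     matches.append(category)
--                 break
--
--     return list(set(matches))  # Remove duplicates
-- ===== SOURCE B (Python) =====
-- _SKILL_KEYWORDS = {
--     'python': ['python', 'django', 'flask'],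
--     'javascript': ['javascript', 'js', 'node', 'react', 'angular', 'vue'],
--     'java': ['java', 'spring', 'kotlin'],
--     'aws': ['aws', 'amazon web services', 'cloud'],
--     'react': ['react', 'frontend'],
--     'machine learning': ['ml', 'machine learning', 'ai', 'artificial intelligence'],
--     'data science': ['data', 'analytics', 'science'],
--     'devops': ['devops', 'infrastructure', 'deployment'],
--     'mobile': ['mobile', 'ios', 'android', 'react native', 'flutter'],
--     'backend': ['backend', 'server', 'api'],
--     'frontend': ['frontend', 'ui', 'ux'],
-- }
--
-- # Flat inverted keyword index: (keyword, category) pairs in table order.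
-- # Because pairs are grouped by category, the FIRST pair whose keyword occurs in a
-- # skill belongs to the FIRST category with any matching keyword, so one linear
-- # scan of this list replaces A's nested category/keyword loops with break.
-- _KW_CAT = [(kw, cat) for cat, kws in _SKILL_KEYWORDS.items() for kw in kws]
--
--
-- def _check_skill_matches(skills, recruiter_text):
--     """Check for skill matches between candidate and recruiter focus"""
--     recruiter_ok = {cat for kw, cat in _KW_CAT if kw in recruiter_text}
--     firsts = [next((cat for kw, cat in _KW_CAT if kw in skill.lower()), None)
--               for skill in skills]
--     seen = dict.fromkeys(c for c in firsts if c is not None)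
--     return [c for c in seen if c in recruiter_ok]
-- ===== Notes on version B (the rewrite author's own statement) =====
-- stated objective: alternative
-- what changed: Replaces A's nested category/keyword loops with a flat inverted (keyword, category) index scanned linearly per skill, precomputes the recruiter-matching categories once from the same index instead of rescanning the recruiter text per matching skill, and dedupes the per-skill first categories with dict.fromkeys before filtering them by the recruiter set, instead of A's interleaved append-with-break followed by list(set(...)).
import Mathlib
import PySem

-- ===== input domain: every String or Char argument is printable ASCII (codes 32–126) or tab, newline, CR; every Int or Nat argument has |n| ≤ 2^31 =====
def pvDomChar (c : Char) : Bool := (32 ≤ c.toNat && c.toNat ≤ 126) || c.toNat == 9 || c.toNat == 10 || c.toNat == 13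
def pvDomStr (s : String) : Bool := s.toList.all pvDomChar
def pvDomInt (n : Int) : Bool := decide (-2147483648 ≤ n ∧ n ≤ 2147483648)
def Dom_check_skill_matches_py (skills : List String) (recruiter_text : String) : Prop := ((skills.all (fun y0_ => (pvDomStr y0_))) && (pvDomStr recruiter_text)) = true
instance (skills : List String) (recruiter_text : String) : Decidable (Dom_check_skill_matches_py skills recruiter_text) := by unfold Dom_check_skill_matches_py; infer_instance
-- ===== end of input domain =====

-- B replaces A's nested category/keyword loops with a flat inverted (keyword, category) index
-- scanned linearly per skill, precomputes the recruiter-matching categories once, and dedupes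
-- the first-match categories before filtering by the recruiter set; same return value
-- (alternative decomposition, no speed claim).

-- the literal skill_keywords dict (insertion order), shared data of both ports
def pvTable : List (String × List String) := [
  ("python", ["python", "django", "flask"]),
  ("javascript", ["javascript", "js", "node", "react", "angular", "vue"]),
  ("java", ["java", "spring", "kotlin"]),
  ("aws", ["aws", "amazon web services", "cloud"]),
  ("react", ["react", "frontend"]),
  ("machine learning", ["ml", "machine learning", "ai", "artificial intelligence"]),
  ("data science", ["data", "analytics", "science"]),
  ("devops", ["devops", "infrastructure", "deployment"]),
  ("mobile", ["mobile", "ios", "android", "react native", "flutter"]),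
  ("backend", ["backend", "server", "api"]),
  ("frontend", ["frontend", "ui", "ux"])]

-- ===== PORT A =====
-- any(keyword in text for keyword in keywords)
def pvHits (kws : List String) (text : String) : Bool := kws.any (fun keyword => PySem.Str.isIn keyword text)

-- 'for category, keywords in skill_keywords.items(): … break' with the running matches list
def pvScanCats (skill_lower : String) (recruiter_text : String) (ms : List String) :
    List (String × List String) → List String
  | [] => ms
  | (category, keywords) :: rest =>
    if pvHits keywords skill_lower then
      (if pvHits keywords recruiter_text then ms ++ [category] else ms)
    else pvScanCats skill_lower recruiter_text ms rest

def check_skill_matches_py (skills : List String) (recruiter_text : String) : List String :=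
  let ms := skills.foldl
    (fun ms skill => pvScanCats (PySem.Str.lower skill) recruiter_text ms pvTable) []
  PySem.Set.ofList ms  -- list(set(matches))

-- ===== PORT B =====
-- _KW_CAT = [(kw, cat) for cat, kws in _SKILL_KEYWORDS.items() for kw in kws]
def pvPairs : List (String × String) :=
  pvTable.flatMap (fun p => p.2.map (fun k => (k, p.1)))

-- next((cat for kw, cat in _KW_CAT if kw in skill.lower()), None)
def pvFirstCat (skill : String) : Option String :=
  (pvPairs.find? (fun q => PySem.Str.isIn q.1 (PySem.Str.lower skill))).map Prod.snd

def check_skill_matches_py_alt (skills : List String) (recruiter_text : String) : List String :=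
  -- recruiter_ok = {cat for kw, cat in _KW_CAT if kw in recruiter_text}
  let recruiter_ok : PySem.Set String :=
    PySem.Set.ofList (pvPairs.filterMap (fun q => if PySem.Str.isIn q.1 recruiter_text then some q.2 else none))
  -- firsts = [next((cat for kw, cat in _KW_CAT if kw in skill.lower()), None) for skill in skills]
  let firsts : List (Option String) := skills.map pvFirstCat
  -- seen = dict.fromkeys(c for c in firsts if c is not None)   (first occurrences, in order)
  let seen : List String := PySem.Set.ofList (firsts.filterMap id)
  -- [c for c in seen if c in recruiter_ok]
  seen.filter (fun c => PySem.Set.contains recruiter_ok c)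

-- ===== PRECONDITION & SPEC =====
def Spec_check_skill_matches_py (skills : List String) (recruiter_text : String) (out : List String) : Prop := out = check_skill_matches_py_alt skills recruiter_text
instance (skills : List String) (recruiter_text : String) (out : List String) : Decidable (Spec_check_skill_matches_py skills recruiter_text out) := by unfold Spec_check_skill_matches_py; infer_instance

-- ===== CLAIM (what is proved, stated in full; the proofs are below) =====
def Claim_equal_check_skill_matches_py : Prop := ∀ (skills : List String) (recruiter_text : String), Dom_check_skill_matches_py skills recruiter_text → Spec_check_skill_matches_py skills recruiter_text (check_skill_matches_py skills recruiter_text)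

-- ===== LEMMAS AND PROOFS =====

-- table-side view of a skill's first matching category (proof-only)
def pvFirstCatT (skill : String) : Option String :=
  (pvTable.find? (fun p => pvHits p.2 (PySem.Str.lower skill))).map Prod.fst

-- per-skill contribution of A's inner loop, as a little list
def pvContrib (recruiter_text skill : String) : List String :=
  match pvTable.find? (fun p => pvHits p.2 (PySem.Str.lower skill)) with
  | some p => if pvHits p.2 recruiter_text then [p.1] else []
  | none => []

-- the recruiter-matching categories, table-side (proof-only)
def pvRList (recruiter_text : String) : List String :=
  pvTable.filterMap (fun p => if pvHits p.2 recruiter_text then some p.1 else none)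

theorem pvScanCats_eq (sl rt : String) :
    ∀ (tbl : List (String × List String)) (ms : List String),
      pvScanCats sl rt ms tbl = ms ++ (match tbl.find? (fun p => pvHits p.2 sl) with
        | some p => if pvHits p.2 rt then [p.1] else []
        | none => []) := by
  intro tbl
  induction tbl with
  | nil => intro ms; simp [pvScanCats]
  | cons hd tl ih =>
    intro ms
    obtain ⟨cat, kws⟩ := hd
    rw [pvScanCats, List.find?_cons]
    cases h : pvHits kws sl with
    | false => simp [ih]
    | true =>
      cases h2 : pvHits kws rt <;> simp [h2]

theorem foldlA_eq (rt : String) :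
    ∀ (skills : List String) (ms : List String),
      skills.foldl (fun ms skill => pvScanCats (PySem.Str.lower skill) rt ms pvTable) ms
        = ms ++ skills.flatMap (pvContrib rt) := by
  intro skills
  induction skills with
  | nil => intro ms; simp
  | cons x xs ih =>
    intro ms
    rw [List.foldl_cons, ih, pvScanCats_eq, List.flatMap_cons, pvContrib, List.append_assoc]

theorem hits_eq_contains (rt : String) (p : String × List String) (hp : p ∈ pvTable) :
    pvHits p.2 rt = (pvRList rt).contains p.1 := by
  have hnd : (pvTable.map Prod.fst).Nodup := by decide
  by_cases h : pvHits p.2 rt = true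
  · rw [h]
    have hm : p.1 ∈ pvRList rt :=
      List.mem_filterMap.2 ⟨p, hp, by simp [h]⟩
    by_cases hc : (pvRList rt).contains p.1 = true
    · rw [hc]
    · exact absurd (by simpa using hm) (by simpa using hc)
  · rw [Bool.not_eq_true] at h
    rw [h]
    have hm : p.1 ∉ pvRList rt := by
      intro hmem
      obtain ⟨q, hq, hqe⟩ := List.mem_filterMap.1 hmem
      by_cases hqh : pvHits q.2 rt = true
      · rw [if_pos hqh] at hqe
        have hq' : q = p := List.inj_on_of_nodup_map hnd hq hp (Option.some.inj hqe)
        rw [hq', h] at hqh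
        exact Bool.false_ne_true hqh
      · rw [if_neg hqh] at hqe
        exact absurd hqe (by simp)
    simpa using hm

theorem flatMap_contrib_eq (rt : String) (skills : List String) :
    skills.flatMap (pvContrib rt)
      = (skills.filterMap pvFirstCatT).filter (fun c => (pvRList rt).contains c) := by
  induction skills with
  | nil => rfl
  | cons x xs ih =>
    rw [List.flatMap_cons, List.filterMap_cons, pvContrib]
    cases hf : pvTable.find? (fun p => pvHits p.2 (PySem.Str.lower x)) with
    | none => simp only [pvFirstCatT, hf, Option.map_none, ih]; rfl
    | some p =>
      have hp : p ∈ pvTable := List.mem_of_find?_eq_some hf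
      simp only [pvFirstCatT, hf, Option.map_some, List.filter_cons]
      rw [hits_eq_contains rt p hp]
      rw [ih]; split <;> rfl

theorem option_map_or {α β : Type} (f : α → β) (a b : Option α) :
    (a.or b).map f = (a.map f).or (b.map f) := by
  cases a <;> rfl

-- the find? over one category's keyword block of the flat index
theorem find_map_pair (s c : String) :
    ∀ ks : List String,
      ((ks.map (fun k => (k, c))).find? (fun q => PySem.Str.isIn q.1 s)).map Prod.snd
        = if ks.any (fun k => PySem.Str.isIn k s) then some c else none := by
  intro ks
  induction ks with
  | nil => rfl
  | cons k tl ih =>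
    rw [List.map_cons, List.find?_cons, List.any_cons]
    cases h : PySem.Str.isIn k s with
    | false => simpa only [h, Bool.false_or] using ih
    | true => simp only [h, Bool.true_or, if_true, Option.map_some]

-- a linear scan of the flat pair index finds exactly the first category with a matching keyword
theorem find_pairs_eq (s : String) :
    ∀ tbl : List (String × List String),
      ((tbl.flatMap (fun p => p.2.map (fun k => (k, p.1)))).find?
          (fun q => PySem.Str.isIn q.1 s)).map Prod.snd
        = (tbl.find? (fun p => pvHits p.2 s)).map Prod.fst := by
  intro tbl
  induction tbl with
  | nil => rfl
  | cons hd tl ih =>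
    obtain ⟨cat, kws⟩ := hd
    simp only [List.flatMap_cons, List.find?_append, List.find?_cons]
    rw [option_map_or, find_map_pair]
    cases h : pvHits kws s with
    | false =>
      have h' : kws.any (fun k => PySem.Str.isIn k s) = false := h
      simp only [h', Bool.false_eq_true, if_false, Option.none_or]
      exact ih
    | true =>
      have h' : kws.any (fun k => PySem.Str.isIn k s) = true := h
      simp only [h', if_true, Option.some_or, Option.map_some]

theorem firstCat_eq (skill : String) : pvFirstCat skill = pvFirstCatT skill := by
  rw [pvFirstCat, pvFirstCatT, pvPairs, find_pairs_eq]

-- the recruiter-ok list built from the flat index has the same MEMBERS as the table-side list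
theorem mem_pairsR_iff (rt c : String) :
    c ∈ pvPairs.filterMap (fun q => if PySem.Str.isIn q.1 rt then some q.2 else none)
      ↔ c ∈ pvRList rt := by
  simp only [pvPairs, pvRList, List.mem_filterMap, List.mem_flatMap, List.mem_map,
    Option.ite_none_right_eq_some, Option.some.injEq, pvHits, List.any_eq_true]
  constructor
  · rintro ⟨q, ⟨p, hp, kw, hkw, rfl⟩, hin, rfl⟩
    exact ⟨p, hp, ⟨kw, hkw, hin⟩, rfl⟩
  · rintro ⟨p, hp, ⟨kw, hkw, hin⟩, rfl⟩
    exact ⟨(kw, p.1), ⟨p, hp, kw, hkw, rfl⟩, hin, rfl⟩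

theorem ofList_filter (p : String → Bool) (xs : List String) :
    PySem.Set.ofList (xs.filter p) = (PySem.Set.ofList xs).filter p := by
  induction xs using List.reverseRecOn with
  | nil => rfl
  | append_singleton xs x ih =>
    rw [List.filter_append, PySem.Set.ofList_append_singleton]
    cases hx : p x
    · have : List.filter p [x] = [] := by simp [hx]
      rw [this, List.append_nil, ih, PySem.Set.add_eq_ite]
      by_cases hm : x ∈ PySem.Set.ofList xs
      · rw [if_pos hm]
      · rw [if_neg hm, List.filter_append]
        simp [hx]
    · have h1 : List.filter p [x] = [x] := by simp [hx]
      rw [h1, PySem.Set.ofList_append_singleton, ih,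
        PySem.Set.add_eq_ite, PySem.Set.add_eq_ite]
      by_cases hm : x ∈ PySem.Set.ofList xs
      · rw [if_pos hm, if_pos (List.mem_filter.2 ⟨hm, hx⟩)]
      · rw [if_neg hm, if_neg (fun hc => hm (List.mem_filter.1 hc).1), List.filter_append]
        simp [hx]

theorem set_contains_ofList (xs : List String) (c : String) :
    PySem.Set.contains (PySem.Set.ofList xs) c = xs.contains c := by
  by_cases h : c ∈ xs <;>
    simp [PySem.Set.contains_eq_listContains, h, PySem.Set.mem_ofList]

-- ===== VERDICT (by name: the statement is the Claim_ definition above) =====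
theorem check_skill_matches_py_spec : Claim_equal_check_skill_matches_py := by
  intro skills rt _
  show check_skill_matches_py skills rt = check_skill_matches_py_alt skills rt
  rw [check_skill_matches_py, check_skill_matches_py_alt]
  rw [foldlA_eq rt skills [], List.nil_append, flatMap_contrib_eq, ofList_filter]
  have hmap : (skills.map pvFirstCat).filterMap id = skills.filterMap pvFirstCatT := by
    rw [List.filterMap_map]
    exact List.filterMap_congr (fun x _ => firstCat_eq x)
  rw [hmap]
  refine List.filter_congr ?_
  intro c _
  rw [set_contains_ofList, Bool.eq_iff_iff]
  simpa using (mem_pairsR_iff rt c).symm
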